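-- pv_equiv track=rewrite | github.com/strayMat/bio-medical_ner | utils_paper/conllUtils.py | line2sent
-- ===== SOURCE A (Python) =====
-- def line2sent(data):
--     ''' Cut the dataset in a list of sentences:
--     input: list of token lines (conll format) with sentences separated by  an empty line ('')
--     output: list of sentences as list of lines
--     '''
--     sent_data = []
--     sent = []
--     for l in data:
--         if l != '':
--             sent.append(l)
--         else:
--             sent_data.append(sent)
--             sent = []
--     return(sent_data)
-- ===== SOURCE B (Python) =====
-- def line2sent(data):
--     sentences = []
--     rest = data
--     while '' in rest:
--         i = rest.index('')
--         sentences.append(rest[:i])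
--         rest = rest[i + 1:]
--     return sentences
-- ===== Notes on version B (the rewrite author's own statement) =====
-- stated objective: alternative
-- what changed: Replaces the single-pass accumulator loop (append to current sentence, flush on empty line) by a find-and-slice loop: repeatedly locate the first empty line with index and emit the slice before it, continuing on the remainder; the tail after the last separator is naturally never emitted.
import Mathlib
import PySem

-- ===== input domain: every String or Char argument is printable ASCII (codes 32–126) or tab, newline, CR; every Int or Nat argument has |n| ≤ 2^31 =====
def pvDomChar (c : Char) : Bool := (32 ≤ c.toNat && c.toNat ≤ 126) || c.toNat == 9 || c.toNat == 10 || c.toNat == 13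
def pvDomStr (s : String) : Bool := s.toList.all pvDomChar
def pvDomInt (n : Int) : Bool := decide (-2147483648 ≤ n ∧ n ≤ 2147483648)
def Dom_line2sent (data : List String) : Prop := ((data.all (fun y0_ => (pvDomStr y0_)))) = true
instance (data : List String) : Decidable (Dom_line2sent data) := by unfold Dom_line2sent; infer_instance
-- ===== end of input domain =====

-- B replaces A's single-pass accumulator loop by a find-first-separator-and-slice loop (alternative decomposition); return values agree on all inputs.


-- ===== PORT A =====
-- single pass: accumulate the current sentence, flush it on each empty line
def line2sent (data : List String) : List (List String) :=
  (data.foldl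
    (fun (st : List (List String) × List String) l =>
      if l ≠ "" then (st.1, st.2 ++ [l]) else (st.1 ++ [st.2], []))
    ([], [])).1

-- ===== PORT B =====
-- recursion mirrors Source B's while loop: rest shrinks each iteration
def line2sentAltGo (rest : List String) (acc : List (List String)) : List (List String) :=
  match h : PySem.List.index? rest "" with
  | none => acc
  | some i =>
      line2sentAltGo (PySem.List.slice rest (some ((i : Int) + 1)) none)
        (acc ++ [PySem.List.slice rest none (some (i : Int))])
termination_by rest.length
decreasing_by
  obtain ⟨hk, _, _⟩ := PySem.List.getElem_of_index?_eq_some h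
  have : ((i : Int) + 1) = (((i + 1 : Nat) : Int)) := by push_cast; ring
  rw [this, PySem.List.slice_from_natCast]
  simp [List.length_drop]; omega

def line2sent_alt (data : List String) : List (List String) :=
  line2sentAltGo data []

-- ===== PRECONDITION & SPEC =====
def Spec_line2sent (data : List String) (out : List (List String)) : Prop := out = line2sent_alt data
instance (data : List String) (out : List (List String)) : Decidable (Spec_line2sent data out) := by unfold Spec_line2sent; infer_instance

-- ===== CLAIM (what is proved, stated in full; the proofs are below) =====
def Claim_equal_line2sent : Prop := ∀ (data : List String), Dom_line2sent data → Spec_line2sent data (line2sent data)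

-- ===== LEMMAS AND PROOFS =====

-- reference splitter: split cur ls = the sentences of ls, with cur the tokens already read
def pvSplit (cur : List String) : List String → List (List String)
  | [] => []
  | l :: ls => if l = "" then cur :: pvSplit [] ls else pvSplit (cur ++ [l]) ls

theorem pvFoldA (data : List String) (acc : List (List String)) (cur : List String) :
    (data.foldl
      (fun (st : List (List String) × List String) l =>
        if l ≠ "" then (st.1, st.2 ++ [l]) else (st.1 ++ [st.2], []))
      (acc, cur)).1 = acc ++ pvSplit cur data := by
  induction data generalizing acc cur with
  | nil => simp [pvSplit]
  | cons l ls ih =>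
      simp only [List.foldl_cons]
      by_cases hl : l = ""
      · rw [if_neg (by simp [hl]), ih]
        simp [pvSplit, hl]
      · rw [if_pos hl, ih]
        simp [pvSplit, hl]

theorem pvSplit_noSep (cur : List String) (ls : List String) (h : "" ∉ ls) :
    pvSplit cur ls = [] := by
  induction ls generalizing cur with
  | nil => rfl
  | cons l t ih =>
      simp only [List.mem_cons, not_or] at h
      simp [pvSplit, Ne.symm h.1, ih _ h.2]

theorem pvSplit_prefix (pre : List String) (h : "" ∉ pre) (cur rest : List String) :
    pvSplit cur (pre ++ rest) = pvSplit (cur ++ pre) rest := by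
  induction pre generalizing cur with
  | nil => simp
  | cons l t ih =>
      simp only [List.mem_cons, not_or] at h
      simp [pvSplit, Ne.symm h.1, ih h.2]

theorem pvAltGo (rest : List String) (acc : List (List String)) :
    line2sentAltGo rest acc = acc ++ pvSplit [] rest := by
  induction hn : rest.length using Nat.strong_induction_on generalizing rest acc with
  | _ n ih =>
    rw [line2sentAltGo]
    split
    next h =>
        rw [PySem.List.index?_eq_none_iff] at h
        simp [pvSplit_noSep _ _ h]
    next i h =>
        rw [PySem.List.index?_eq_some_iff] at h
        obtain ⟨pre, suf, hrest, hlen, hmem⟩ := h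
        subst hrest
        have h1 : PySem.List.slice (pre ++ "" :: suf) none (some (i : Int)) = pre := by
          rw [PySem.List.slice_to_natCast, ← hlen, List.take_left]
        have h2 : PySem.List.slice (pre ++ "" :: suf) (some ((i : Int) + 1)) none = suf := by
          have : ((i : Int) + 1) = (((i + 1 : Nat) : Int)) := by push_cast; ring
          rw [this, PySem.List.slice_from_natCast, ← hlen]
          simp
        rw [h1, h2, ih suf.length (by subst hn; simp; omega) suf _ rfl]
        rw [pvSplit_prefix pre hmem]
        simp [pvSplit]

-- ===== VERDICT (by name: the statement is the Claim_ definition above) =====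
theorem line2sent_spec : Claim_equal_line2sent := by
  intro data _
  unfold Spec_line2sent line2sent line2sent_alt
  rw [pvFoldA, pvAltGo]
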